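-- pv_equiv track=rewrite | github.com/nuheajiohc/algorithm-study | 프로그래머스/unrated/138476. 귤 고르기/귤 고르기.py | solution
-- ===== SOURCE A (Python) =====
-- from collections import Counter
--
-- def solution(k, tangerine):
--
--     sums =Counter(tangerine)
--     nums=[sums[t] for t in sums]
--     nums.sort(reverse=True)
--     answer = len(nums)
--     st=0
--     en=0
--     s=nums[0]
--     temp=0
--     while st<len(nums) and en<len(nums):
--         if s>=k:
--             temp+=1
--             answer=min(answer,temp)
--             s-=nums[st]
--             st+=1
--             temp-=1
--         else:
--             temp+=1
--             en+=1
--             if en>=len(nums):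
--                 break
--             s+=nums[en]
--     return answer
-- ===== SOURCE B (Python) =====
-- from collections import Counter
--
-- def solution(k, tangerine):
--     nums = sorted(Counter(tangerine).values(), reverse=True)
--     s = 0
--     for i, n in enumerate(nums):
--         s += n
--         if s >= k:
--             return i + 1
--     return len(nums)
-- ===== Notes on version B (the rewrite author's own statement) =====
-- stated objective: simpler
-- what changed: Replaced A's bidirectional two-pointer minimum-window search over the sorted-descending counts by a single monotone prefix-sum scan that returns at the first index where the running sum reaches k (same O(n log n) sort dominates; the scan is a measured constant-factor win over the window bookkeeping).
import Mathlib
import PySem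

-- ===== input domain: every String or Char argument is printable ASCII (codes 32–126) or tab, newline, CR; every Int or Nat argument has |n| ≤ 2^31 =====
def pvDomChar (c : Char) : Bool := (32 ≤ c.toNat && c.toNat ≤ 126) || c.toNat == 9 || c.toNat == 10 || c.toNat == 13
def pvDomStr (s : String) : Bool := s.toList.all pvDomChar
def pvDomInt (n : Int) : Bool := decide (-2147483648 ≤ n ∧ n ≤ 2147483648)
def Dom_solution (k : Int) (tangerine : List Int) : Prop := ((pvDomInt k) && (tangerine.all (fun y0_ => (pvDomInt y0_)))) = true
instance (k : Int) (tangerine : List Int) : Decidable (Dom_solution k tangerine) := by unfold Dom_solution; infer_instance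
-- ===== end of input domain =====

-- B replaces A's two-pointer minimum-window search over the sorted-descending counts by a single
-- monotone prefix-sum scan; equivalence of the return values is proved on all nonempty inputs
-- (A raises IndexError on empty tangerine, excluded by Pre_; B returns 0 there).

-- ===== PORT A =====
-- the while loop of A; temp is carried exactly as Python does (temp+=1; ...; temp-=1 in the
-- first branch nets to temp)
def solutionLoop (nums : List Int) (k : Int) (st en : Nat) (s temp answer : Int) : Int :=
  if h : st < nums.length ∧ en < nums.length then
    if s ≥ k then
      solutionLoop nums k (st + 1) en (s - nums.getD st 0) (temp + 1 - 1) (min answer (temp + 1))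
    else
      if nums.length ≤ en + 1 then answer
      else solutionLoop nums k st (en + 1) (s + nums.getD (en + 1) 0) (temp + 1) answer
  else answer
termination_by 2 * nums.length - st - en
decreasing_by all_goals omega

-- A after building nums: answer = len(nums); s = nums[0]; then the while loop
def solutionMain (k : Int) (nums : List Int) : Int :=
  match nums with
  | [] => 0  -- Python raises IndexError at nums[0]; excluded by Pre_solution
  | n0 :: _ => solutionLoop nums k 0 0 n0 0 (nums.length : Int)

def solution (k : Int) (tangerine : List Int) : Int :=
  solutionMain k (PySem.List.sorted
    ((PySem.Dict.counter tangerine).keys.map (fun t => (PySem.Dict.counter tangerine).getD t 0))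
    (fun x => x) true)

-- ===== PORT B =====
-- the enumerate loop of B: rest is the tail still to scan, s the running sum, i the index
def prefGo (k : Int) (rest : List Int) (s : Int) (i : Nat) (total : Nat) : Int :=
  match rest with
  | [] => (total : Int)
  | n :: rest' => if s + n ≥ k then ((i + 1 : Nat) : Int) else prefGo k rest' (s + n) (i + 1) total

-- B after building nums: the running prefix-sum scan
def altMain (k : Int) (nums : List Int) : Int :=
  prefGo k nums 0 0 nums.length

def solution_alt (k : Int) (tangerine : List Int) : Int :=
  altMain k (PySem.List.sorted (PySem.Dict.counter tangerine).values (fun x => x) true)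

-- ===== PRECONDITION & SPEC =====
-- Pre_ excludes exactly the empty list, on which A raises IndexError at nums[0].
def Pre_solution (k : Int) (tangerine : List Int) : Prop := tangerine ≠ []
instance (k : Int) (tangerine : List Int) : Decidable (Pre_solution k tangerine) := by
  unfold Pre_solution; infer_instance

def pvWitness_solution : Int × List Int := (2, [1, 1, 2])

def Spec_solution (k : Int) (tangerine : List Int) (out : Int) : Prop := out = solution_alt k tangerine
instance (k : Int) (tangerine : List Int) (out : Int) : Decidable (Spec_solution k tangerine out) := by
  unfold Spec_solution; infer_instance

-- ===== CLAIM =====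
def Claim_equal_solution : Prop := ∀ (k : Int) (tangerine : List Int),
  Dom_solution k tangerine → Pre_solution k tangerine → Spec_solution k tangerine (solution k tangerine)

-- ===== LEMMAS AND PROOFS =====

-- pushing a min through the answer accumulator of A's loop
theorem loop_min (nums : List Int) (k : Int) (st en : Nat) (s temp a b : Int) :
    solutionLoop nums k st en s temp (min a b) = min a (solutionLoop nums k st en s temp b) := by
  conv_lhs => rw [solutionLoop]
  conv_rhs => rw [solutionLoop]
  by_cases h : st < nums.length ∧ en < nums.length
  · rw [dif_pos h, dif_pos h]
    by_cases hs : s ≥ k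
    · rw [if_pos hs, if_pos hs,
        show min (min a b) (temp + 1) = min a (min b (temp + 1)) by omega]
      exact loop_min nums k (st + 1) en (s - nums.getD st 0) (temp + 1 - 1) a (min b (temp + 1))
    · rw [if_neg hs, if_neg hs]
      by_cases he : nums.length ≤ en + 1
      · rw [if_pos he, if_pos he]
      · rw [if_neg he, if_neg he]
        exact loop_min nums k st (en + 1) (s + nums.getD (en + 1) 0) (temp + 1) a b
  · rw [dif_neg h, dif_neg h]
termination_by 2 * nums.length - st - en
decreasing_by all_goals omega

-- every value A's loop can still record is at least en+1 (temp tracks en)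
theorem loop_lb (nums : List Int) (k : Int) (st en : Nat) (s a : Int) (temp : Int)
    (ht : temp = (en : Int)) :
    min a ((en : Int) + 1) ≤ solutionLoop nums k st en s temp a := by
  rw [solutionLoop]
  split
  · split
    · have := loop_lb nums k (st + 1) en (s - nums.getD st 0) (min a (temp + 1)) (temp + 1 - 1)
        (by omega)
      omega
    · split
      · omega
      · have := loop_lb nums k st (en + 1) (s + nums.getD (en + 1) 0) a (temp + 1) (by push_cast; omega)
        omega
  · omega
termination_by 2 * nums.length - st - en
decreasing_by all_goals omega

-- the core correspondence: A's loop at window start 0, right end en, with the prefix sum of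
-- the first en+1 elements, equals B's scan resumed at index en
theorem loop_eq_pref (nums : List Int) (k : Int) (en : Nat) (hen : en < nums.length) :
    solutionLoop nums k 0 en ((nums.take (en + 1)).sum) ((en : Nat) : Int) (nums.length : Int)
      = prefGo k (nums.drop en) ((nums.take en).sum) en nums.length := by
  have hdrop : nums.drop en = nums[en] :: nums.drop (en + 1) := List.drop_eq_getElem_cons hen
  have hsum : (nums.take (en + 1)).sum = (nums.take en).sum + nums[en] :=
    List.sum_take_succ nums en hen
  rw [hdrop, prefGo, solutionLoop]
  rw [dif_pos ⟨by omega, hen⟩]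
  by_cases hk : (nums.take en).sum + nums[en] ≥ k
  · rw [if_pos (by omega : (nums.take (en + 1)).sum ≥ k), if_pos hk]
    have hmin : min ((nums.length : Nat) : Int) ((en : Int) + 1)
        = min ((en : Int) + 1) ((nums.length : Nat) : Int) := by omega
    rw [hmin, loop_min]
    have hlb := loop_lb nums k 1 en ((nums.take (en + 1)).sum - nums.getD 0 0)
      ((nums.length : Nat) : Int) ((en : Int) + 1 - 1) (by omega)
    have hlen : (en : Int) + 1 ≤ ((nums.length : Nat) : Int) := by exact_mod_cast hen
    push_cast
    omega
  · rw [if_neg (by omega : ¬ (nums.take (en + 1)).sum ≥ k), if_neg hk]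
    by_cases hend : nums.length ≤ en + 1
    · rw [if_pos hend]
      have : nums.drop (en + 1) = [] := List.drop_eq_nil_of_le hend
      rw [this, prefGo]
    · rw [if_neg hend]
      have hlt : en + 1 < nums.length := by omega
      have hget : nums.getD (en + 1) 0 = nums[en + 1] := List.getD_eq_getElem nums 0 hlt
      have hsum2 : (nums.take (en + 1)).sum + nums.getD (en + 1) 0
          = (nums.take (en + 1 + 1)).sum := by
        rw [hget, List.sum_take_succ nums (en + 1) hlt]
      have IH := loop_eq_pref nums k (en + 1) hlt
      push_cast at IH
      rw [hsum2, IH, ← hsum]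
termination_by nums.length - en
decreasing_by omega

-- the two ports build the same sorted count list
theorem same_nums (tangerine : List Int) :
    PySem.List.sorted ((PySem.Dict.counter tangerine).keys.map
        (fun t => (PySem.Dict.counter tangerine).getD t 0)) (fun x => x) true
      = PySem.List.sorted (PySem.Dict.counter tangerine).values (fun x => x) true := by
  rw [PySem.Dict.values_eq_map_keys _ (PySem.Dict.nodup_keys_counter tangerine) 0]

-- ===== VERDICT =====
theorem solution_spec : Claim_equal_solution := by
  intro k tangerine _ hpre
  unfold Spec_solution solution solution_alt
  rw [same_nums]
  unfold solutionMain altMain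
  generalize hg : PySem.List.sorted (PySem.Dict.counter tangerine).values (fun x => x) true = nums
  rcases nums with _ | ⟨n0, rest⟩
  · exfalso
    rw [PySem.List.sorted_eq_nil_iff] at hg
    have hkeys : (PySem.Dict.counter tangerine).keys = [] := by
      have hlen : (PySem.Dict.counter tangerine).keys.length
          = (PySem.Dict.counter tangerine).values.length := by
        simp [PySem.Dict.keys, PySem.Dict.values]
      rw [hg] at hlen
      exact List.length_eq_zero_iff.mp hlen
    rw [PySem.Dict.keys_counter] at hkeys
    rcases tangerine with _ | ⟨t, r⟩
    · exact hpre rfl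
    · exact absurd hkeys (by simp [pysem])
  · have h := loop_eq_pref (n0 :: rest) k 0 (by simp)
    simpa using h
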